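-- pv_equiv track=rewrite | github.com/OneVth/programmers-python | Lv0/120866/review_1.py | solution_v2
-- ===== SOURCE A (Python) =====
-- def solution_v2(board: list[list[int]]) -> int:
--     """
--     [Approach] In-place 마킹 (-1로 위험지역 표시)
--     [Time] O(n²)  [Space] O(1)
--     ⚠️ 원본 board가 변경됨 (부작용)
--     """
--     directions = [(-1, -1), (-1, 0), (-1, 1), (0, -1), (0, 1), (1, -1), (1, 0), (1, 1)]
--
--     n = len(board)
--     for i in range(n):
--         for j in range(n):
--             if board[i][j] == 1:
--                 for dy, dx in directions:
--                     if (
--                         0 <= i + dy < n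
--                         and 0 <= j + dx < n
--                         and board[i + dy][j + dx] != 1
--                     ):
--                         board[i + dy][j + dx] = -1
--
--     return sum(board[i].count(0) for i in range(n))
-- ===== SOURCE B (Python) =====
-- def solution_v2(board: list[list[int]]) -> int:
--     # Gather pass: count each 0-cell with no in-bounds neighbor equal to 1.
--     # Pure (does not mutate board); equivalence with A is about the return value.
--     directions = ((-1, -1), (-1, 0), (-1, 1), (0, -1), (0, 1), (1, -1), (1, 0), (1, 1))
--     n = len(board)
--     count = 0
--     for i in range(n):
--         for j in range(n):
--             if board[i][j] == 0 and not any(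
--                 0 <= i + dy < n and 0 <= j + dx < n and board[i + dy][j + dx] == 1
--                 for dy, dx in directions
--             ):
--                 count += 1
--     return count
-- ===== Notes on version B (the rewrite author's own statement) =====
-- stated objective: alternative
-- what changed: A scatters from each 1-cell, mutating the board by marking neighbors -1 and then summing per-row zero counts; B is a pure single gather pass that counts each 0-cell having no in-bounds neighbor equal to 1, with no mutation and no second counting pass.
-- outside the precondition, e.g. on solution_v2([[0, 0, 0], [0, 0, 0]]): A returns 6, B returns 4
import Mathlib
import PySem

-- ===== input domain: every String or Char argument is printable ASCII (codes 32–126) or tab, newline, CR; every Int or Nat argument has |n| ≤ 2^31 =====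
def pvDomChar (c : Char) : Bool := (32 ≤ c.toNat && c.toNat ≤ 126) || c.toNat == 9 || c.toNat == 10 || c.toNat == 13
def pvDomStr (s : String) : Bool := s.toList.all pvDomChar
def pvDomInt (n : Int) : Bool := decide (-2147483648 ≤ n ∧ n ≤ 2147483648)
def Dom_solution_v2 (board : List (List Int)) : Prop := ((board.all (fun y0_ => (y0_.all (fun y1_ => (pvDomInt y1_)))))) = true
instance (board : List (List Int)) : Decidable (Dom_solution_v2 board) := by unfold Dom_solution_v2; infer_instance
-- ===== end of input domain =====

-- A scatters -1 marks from each 1-cell into the (mutated) board, then sums per-row zero counts;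
-- B is a pure single gather pass counting 0-cells with no in-bounds neighbor equal to 1.
-- A mutates its argument in place, B does not: the equivalence proved is about the RETURN value.

-- ===== PORT A =====
def pvDirs : List (Int × Int) :=
  [(-1, -1), (-1, 0), (-1, 1), (0, -1), (0, 1), (1, -1), (1, 0), (1, 1)]

-- board[i][j] read (both ports only read at indices 0 ≤ i,j < n, in range under Pre_)
def pvGet (g : List (List Int)) (i j : Nat) : Int := (g.getD i []).getD j 0

-- board[i][j] = v
def pvSet (g : List (List Int)) (i j : Nat) (v : Int) : List (List Int) :=
  g.set i ((g.getD i []).set j v)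

-- body of A's 'if board[i][j] == 1: for dy, dx in directions: …'
def pvMarkCell (n : Nat) (g : List (List Int)) (i j : Nat) : List (List Int) :=
  if pvGet g i j = 1 then
    pvDirs.foldl (fun g d =>
      let y : Int := (i : Int) + d.1
      let x : Int := (j : Int) + d.2
      if 0 ≤ y ∧ y < (n : Int) ∧ 0 ≤ x ∧ x < (n : Int) ∧ pvGet g y.toNat x.toNat ≠ 1 then
        pvSet g y.toNat x.toNat (-1)
      else g) g
  else g

def solution_v2 (board : List (List Int)) : Int :=
  let n := board.length
  let final := (List.range n).foldl
    (fun g i => (List.range n).foldl (fun g j => pvMarkCell n g i j) g) board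
  ((List.range n).map (fun i => ((final.getD i []).count 0 : Int))).sum

-- ===== PORT B =====
-- 'any(0 <= i+dy < n and 0 <= j+dx < n and board[i+dy][j+dx] == 1 for dy, dx in directions)'
def pvHasOneNbr (board : List (List Int)) (n i j : Nat) : Bool :=
  pvDirs.any (fun d =>
    let y : Int := (i : Int) + d.1
    let x : Int := (j : Int) + d.2
    decide (0 ≤ y) && decide (y < (n : Int)) && decide (0 ≤ x) && decide (x < (n : Int)) &&
      decide (pvGet board y.toNat x.toNat = 1))

def solution_v2_alt (board : List (List Int)) : Int :=
  let n := board.length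
  (List.range n).foldl (fun acc i =>
    (List.range n).foldl (fun acc j =>
      if pvGet board i j = 0 ∧ pvHasOneNbr board n i j = false then acc + 1 else acc) acc) 0

-- ===== PRECONDITION & SPEC =====
-- Pre_ excludes non-square boards, which are outside the problem's n×n domain: on them A raises
-- IndexError when a row is shorter than len(board), and on over-long rows A's return value counts
-- zeros in the row tails beyond column n that the algorithm never inspects.
def Pre_solution_v2 (board : List (List Int)) : Prop :=
  ∀ row ∈ board, row.length = board.length

instance (board : List (List Int)) : Decidable (Pre_solution_v2 board) := by
  unfold Pre_solution_v2; infer_instance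

def pvWitness_solution_v2 : List (List Int) := [[1, 0], [0, 0]]

def Spec_solution_v2 (board : List (List Int)) (out : Int) : Prop := out = solution_v2_alt board
instance (board : List (List Int)) (out : Int) : Decidable (Spec_solution_v2 board out) := by
  unfold Spec_solution_v2; infer_instance

-- ===== CLAIM (what is proved, stated in full; the proofs are below) =====
def Claim_equal_solution_v2 : Prop :=
  ∀ (board : List (List Int)), Dom_solution_v2 board → Pre_solution_v2 board →
    Spec_solution_v2 board (solution_v2 board)

-- ===== LEMMAS AND PROOFS =====

-- square board of size n
def pvSq (g : List (List Int)) (n : Nat) : Prop :=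
  g.length = n ∧ ∀ row ∈ g, row.length = n

-- (i,j) is a neighbor of (p,q)
def pvAdjB (i j p q : Nat) : Bool :=
  pvDirs.any (fun d => (i : Int) == (p : Int) + d.1 && (j : Int) == (q : Int) + d.2)

-- some processed 1-cell is adjacent to (i,j)
def pvHitB (orig : List (List Int)) (P : List (Nat × Nat)) (i j : Nat) : Bool :=
  P.any (fun pq => pvGet orig pq.1 pq.2 == 1 && pvAdjB i j pq.1 pq.2)

-- the inner fold's step function of pvMarkCell, named for the proofs
def pvStep (n p q : Nat) (g : List (List Int)) (d : Int × Int) : List (List Int) :=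
  if 0 ≤ (p : Int) + d.1 ∧ (p : Int) + d.1 < (n : Int) ∧ 0 ≤ (q : Int) + d.2 ∧
      (q : Int) + d.2 < (n : Int) ∧ pvGet g ((p : Int) + d.1).toNat ((q : Int) + d.2).toNat ≠ 1 then
    pvSet g ((p : Int) + d.1).toNat ((q : Int) + d.2).toNat (-1)
  else g

lemma pvMarkCell_def (n : Nat) (g : List (List Int)) (i j : Nat) :
    pvMarkCell n g i j =
      if pvGet g i j = 1 then pvDirs.foldl (pvStep n i j) g else g := rfl

lemma pvGetD_set {α : Type} (l : List α) (c j : Nat) (v d : α) (hc : c < l.length) :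
    (l.set c v).getD j d = if j = c then v else l.getD j d := by
  rw [List.getD_eq_getElem?_getD]
  by_cases h : j = c
  · subst h; rw [List.getElem?_set_self hc]; simp
  · rw [List.getElem?_set_ne (by omega), ← List.getD_eq_getElem?_getD, if_neg h]

lemma pvSq_set (g : List (List Int)) (n a c : Nat) (v : Int) (h : pvSq g n) (ha : a < n) :
    pvSq (pvSet g a c v) n := by
  obtain ⟨h1, h2⟩ := h
  refine ⟨by simp [pvSet, h1], ?_⟩
  intro row hrow
  rcases List.mem_or_eq_of_mem_set hrow with hm | hm
  · exact h2 _ hm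
  · subst hm
    have hag : a < g.length := by omega
    rw [List.length_set, List.getD_eq_getElem _ _ hag]
    exact h2 _ (List.getElem_mem hag)

lemma pvGet_pvSet (g : List (List Int)) (n a c i j : Nat) (v : Int) (hsq : pvSq g n)
    (ha : a < n) (hc : c < n) :
    pvGet (pvSet g a c v) i j = if i = a ∧ j = c then v else pvGet g i j := by
  obtain ⟨h1, h2⟩ := hsq
  have hag : a < g.length := by omega
  have hrow : (g.getD a []).length = n := by
    rw [List.getD_eq_getElem _ _ hag]; exact h2 _ (List.getElem_mem hag)
  have houter : (pvSet g a c v).getD i [] =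
      if i = a then (g.getD a []).set c v else g.getD i [] := by
    rw [pvSet, pvGetD_set g a i ((g.getD a []).set c v) [] hag]
  simp only [pvGet, houter]
  by_cases hia : i = a
  · rw [if_pos hia, pvGetD_set (g.getD a []) c j v 0 (by omega)]
    by_cases hjc : j = c
    · simp [hia, hjc]
    · simp [hia, hjc]
  · simp [hia]

lemma pvStep_sq (n p q : Nat) (g : List (List Int)) (d : Int × Int) (h : pvSq g n) :
    pvSq (pvStep n p q g d) n := by
  unfold pvStep
  split
  · next hc => exact pvSq_set _ _ _ _ _ h (by omega)
  · exact h

lemma pvFold_sq (n p q : Nat) (ds : List (Int × Int)) :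
    ∀ g, pvSq g n → pvSq (ds.foldl (pvStep n p q) g) n := by
  induction ds with
  | nil => intro g h; exact h
  | cons d ds ih => intro g h; exact ih _ (pvStep_sq n p q g d h)

lemma pvFold_get (n p q : Nat) (hp : p < n) (hq : q < n) (ds : List (Int × Int)) :
    ∀ g, pvSq g n → ∀ i j, i < n → j < n →
      pvGet (ds.foldl (pvStep n p q) g) i j =
        if (∃ d ∈ ds, (i : Int) = (p : Int) + d.1 ∧ (j : Int) = (q : Int) + d.2) ∧
            pvGet g i j ≠ 1 then -1
        else pvGet g i j := by
  induction ds with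
  | nil => intro g _ i j _ _; simp
  | cons d ds ih =>
    intro g hsq i j hi hj
    by_cases hmatch : (i : Int) = (p : Int) + d.1 ∧ (j : Int) = (q : Int) + d.2
    · obtain ⟨hy, hx⟩ := hmatch
      have hyt : ((p : Int) + d.1).toNat = i := by omega
      have hxt : ((q : Int) + d.2).toNat = j := by omega
      by_cases hne : pvGet g i j = 1
      · have hstep : pvStep n p q g d = g := by
          unfold pvStep
          rw [if_neg]
          rw [hyt, hxt]
          simp only [not_and, ne_eq, not_not]
          intro _ _ _ _
          exact hne
        rw [List.foldl_cons, hstep, ih g hsq i j hi hj]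
        simp [hne]
      · have hstep : pvStep n p q g d = pvSet g i j (-1) := by
          unfold pvStep
          rw [hyt, hxt, if_pos]
          exact ⟨by omega, by omega, by omega, by omega, hne⟩
        have hsq1 : pvSq (pvSet g i j (-1)) n := pvSq_set _ _ _ _ _ hsq hi
        rw [List.foldl_cons, hstep, ih _ hsq1 i j hi hj]
        have hg1 : pvGet (pvSet g i j (-1)) i j = -1 := by
          rw [pvGet_pvSet g n i j i j (-1) hsq hi hj]; simp
        rw [hg1]
        have hcond : (∃ d' ∈ d :: ds, (i : Int) = (p : Int) + d'.1 ∧ (j : Int) = (q : Int) + d'.2)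
            ∧ pvGet g i j ≠ 1 := ⟨⟨d, List.mem_cons_self, hy, hx⟩, hne⟩
        rw [if_pos hcond]
        split
        · rfl
        · rfl
    · -- d does not target (i,j); the step leaves cell (i,j) unchanged
      have hkeep : pvGet (pvStep n p q g d) i j = pvGet g i j := by
        unfold pvStep
        split
        · next hcnd =>
          obtain ⟨h1, h2, h3, h4, _⟩ := hcnd
          rw [pvGet_pvSet g n _ _ i j (-1) hsq (by omega) (by omega)]
          rw [if_neg]
          intro hcon
          exact hmatch ⟨by omega, by omega⟩
        · rfl
      rw [List.foldl_cons, ih _ (pvStep_sq n p q g d hsq) i j hi hj, hkeep]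
      have hiff : (∃ d' ∈ d :: ds, (i : Int) = (p : Int) + d'.1 ∧ (j : Int) = (q : Int) + d'.2) ↔
          (∃ d' ∈ ds, (i : Int) = (p : Int) + d'.1 ∧ (j : Int) = (q : Int) + d'.2) := by
        constructor
        · rintro ⟨d', hd', hm⟩
          rcases List.mem_cons.mp hd' with h | h
          · exact absurd (h ▸ hm) hmatch
          · exact ⟨d', h, hm⟩
        · rintro ⟨d', hd', hm⟩; exact ⟨d', List.mem_cons_of_mem _ hd', hm⟩
      simp only [hiff]

lemma pvAdjB_iff (i j p q : Nat) :
    pvAdjB i j p q = true ↔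
      ∃ d ∈ pvDirs, (i : Int) = (p : Int) + d.1 ∧ (j : Int) = (q : Int) + d.2 := by
  simp [pvAdjB, List.any_eq_true]

-- the loop invariant: after processing the cell list P, the board is orig with every
-- non-1 cell adjacent to a processed 1-cell overwritten by -1
def pvInv (orig : List (List Int)) (n : Nat) (P : List (Nat × Nat)) (g : List (List Int)) : Prop :=
  ∀ i j, i < n → j < n →
    pvGet g i j =
      if pvGet orig i j = 1 then 1
      else if pvHitB orig P i j = true then -1
      else pvGet orig i j

lemma pvInv_one (orig : List (List Int)) (n : Nat) (P : List (Nat × Nat))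
    (g : List (List Int)) (hinv : pvInv orig n P g) (i j : Nat) (hi : i < n) (hj : j < n) :
    (pvGet g i j = 1 ↔ pvGet orig i j = 1) := by
  have h := hinv i j hi hj
  split_ifs at h with h1 h2 <;> constructor <;> intro hx <;> omega

lemma pvHitB_append (orig : List (List Int)) (P : List (Nat × Nat)) (p q i j : Nat) :
    pvHitB orig (P ++ [(p, q)]) i j =
      (pvHitB orig P i j || (pvGet orig p q == 1 && pvAdjB i j p q)) := by
  simp [pvHitB, List.any_append]

lemma pvMark_inv (orig : List (List Int)) (n : Nat) (P : List (Nat × Nat)) (p q : Nat)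
    (hp : p < n) (hq : q < n) (g : List (List Int)) (hsq : pvSq g n)
    (hinv : pvInv orig n P g) :
    pvSq (pvMarkCell n g p q) n ∧ pvInv orig n (P ++ [(p, q)]) (pvMarkCell n g p q) := by
  rw [pvMarkCell_def]
  by_cases hone : pvGet g p q = 1
  · have horig1 : pvGet orig p q = 1 := (pvInv_one orig n P g hinv p q hp hq).mp hone
    rw [if_pos hone]
    refine ⟨pvFold_sq n p q pvDirs g hsq, ?_⟩
    intro i j hi hj
    rw [pvFold_get n p q hp hq pvDirs g hsq i j hi hj]
    have hgo := hinv i j hi hj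
    have h1iff := pvInv_one orig n P g hinv i j hi hj
    rw [pvHitB_append]
    by_cases hoij : pvGet orig i j = 1
    · have hg1 : pvGet g i j = 1 := h1iff.mpr hoij
      rw [if_neg (by rintro ⟨-, hne⟩; exact hne hg1), hg1, if_pos hoij]
    · have hgne : pvGet g i j ≠ 1 := fun h => hoij (h1iff.mp h)
      by_cases hadj : pvAdjB i j p q = true
      · have hex := (pvAdjB_iff i j p q).mp hadj
        rw [if_pos ⟨hex, hgne⟩, if_neg hoij, if_pos]
        simp [hadj, horig1]
      · have hnex : ¬ ∃ d ∈ pvDirs, (i : Int) = (p : Int) + d.1 ∧ (j : Int) = (q : Int) + d.2 :=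
          fun h => hadj ((pvAdjB_iff i j p q).mpr h)
        rw [if_neg (by rintro ⟨hex, -⟩; exact hnex hex), hgo, if_neg hoij,
          if_neg hoij]
        rw [Bool.not_eq_true] at hadj
        rw [hadj, Bool.and_false, Bool.or_false]
  · have horig1 : pvGet orig p q ≠ 1 :=
      fun h => hone ((pvInv_one orig n P g hinv p q hp hq).mpr h)
    rw [if_neg hone]
    refine ⟨hsq, ?_⟩
    intro i j hi hj
    rw [hinv i j hi hj, pvHitB_append]
    have : (pvGet orig p q == 1 && pvAdjB i j p q) = false := by
      simp [horig1]
    rw [this, Bool.or_false]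

lemma pvFoldPairs_inv (orig : List (List Int)) (n : Nat) :
    ∀ (L : List (Nat × Nat)) (P : List (Nat × Nat)) (g : List (List Int)),
      (∀ pq ∈ L, pq.1 < n ∧ pq.2 < n) → pvSq g n → pvInv orig n P g →
      pvSq (L.foldl (fun g pq => pvMarkCell n g pq.1 pq.2) g) n ∧
      pvInv orig n (P ++ L) (L.foldl (fun g pq => pvMarkCell n g pq.1 pq.2) g) := by
  intro L
  induction L with
  | nil => intro P g _ hsq hinv; simpa using ⟨hsq, hinv⟩
  | cons pq L ih =>
    intro P g hL hsq hinv
    have hpq := hL pq List.mem_cons_self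
    have hstep := pvMark_inv orig n P pq.1 pq.2 hpq.1 hpq.2 g hsq hinv
    have hrest := ih (P ++ [(pq.1, pq.2)]) (pvMarkCell n g pq.1 pq.2)
      (fun x hx => hL x (List.mem_cons_of_mem _ hx)) hstep.1 hstep.2
    rw [List.foldl_cons]
    refine ⟨hrest.1, ?_⟩
    have happ : P ++ [(pq.1, pq.2)] ++ L = P ++ pq :: L := by simp
    rw [← happ]
    exact hrest.2

-- the processed cell list of A's double loop
def pvPairs (n : Nat) : List (Nat × Nat) :=
  (List.range n).flatMap (fun i => (List.range n).map (fun j => (i, j)))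

lemma pvFoldl_congr {α β : Type} (l : List α) :
    ∀ (f g : β → α → β) (b : β), (∀ b a, f b a = g b a) → l.foldl f b = l.foldl g b := by
  induction l with
  | nil => intro f g b _; rfl
  | cons a l ih => intro f g b h; rw [List.foldl_cons, List.foldl_cons, h]; exact ih f g _ h

lemma pvFoldl_flatMap {α β γ : Type} (f : γ → β → γ) (g : α → List β) (l : List α) :
    ∀ c, (l.flatMap g).foldl f c = l.foldl (fun c a => (g a).foldl f c) c := by
  induction l with
  | nil => intro c; rfl
  | cons a l ih => intro c; simp only [List.flatMap_cons, List.foldl_append, List.foldl_cons, ih]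

lemma pvFold_eq_pairs (n : Nat) (g0 : List (List Int)) :
    (List.range n).foldl
      (fun g i => (List.range n).foldl (fun g j => pvMarkCell n g i j) g) g0 =
    (pvPairs n).foldl (fun g pq => pvMarkCell n g pq.1 pq.2) g0 := by
  rw [pvPairs, pvFoldl_flatMap]
  apply pvFoldl_congr
  intro g i
  rw [List.foldl_map]

lemma pvMem_pairs (n : Nat) (pq : Nat × Nat) : pq ∈ pvPairs n ↔ pq.1 < n ∧ pq.2 < n := by
  cases pq with
  | mk p q => simp [pvPairs, List.mem_flatMap, List.mem_map, List.mem_range]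

lemma pvDirs_neg : ∀ d ∈ pvDirs, (-d.1, -d.2) ∈ pvDirs := by decide

lemma pvHit_pairs_iff (b : List (List Int)) (n i j : Nat) (hi : i < n) (hj : j < n) :
    pvHitB b (pvPairs n) i j = true ↔ pvHasOneNbr b n i j = true := by
  rw [pvHitB, List.any_eq_true, pvHasOneNbr, List.any_eq_true]
  constructor
  · rintro ⟨pq, hpq, hcond⟩
    obtain ⟨hp, hq⟩ := (pvMem_pairs n pq).mp hpq
    simp only [Bool.and_eq_true, beq_iff_eq] at hcond
    obtain ⟨h1, hadj⟩ := hcond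
    obtain ⟨d, hd, hy, hx⟩ := (pvAdjB_iff i j pq.1 pq.2).mp hadj
    refine ⟨(-d.1, -d.2), pvDirs_neg d hd, ?_⟩
    have h1' : (i : Int) + -d.1 = (pq.1 : Int) := by omega
    have h2' : (j : Int) + -d.2 = (pq.2 : Int) := by omega
    simp only [h1', h2', Int.toNat_natCast]
    simp [h1, hp, hq]
  · rintro ⟨d, hd, hcond⟩
    simp only [Bool.and_eq_true, decide_eq_true_eq] at hcond
    obtain ⟨⟨⟨⟨hy0, hyn⟩, hx0⟩, hxn⟩, hval⟩ := hcond
    refine ⟨(((i : Int) + d.1).toNat, ((j : Int) + d.2).toNat),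
      (pvMem_pairs n _).mpr ⟨by omega, by omega⟩, ?_⟩
    simp only [Bool.and_eq_true, beq_iff_eq]
    refine ⟨hval, (pvAdjB_iff _ _ _ _).mpr ⟨(-d.1, -d.2), pvDirs_neg d hd, by omega, by omega⟩⟩

lemma pvCount_eq_countP_range (l : List Int) (v : Int) :
    l.count v = (List.range l.length).countP (fun j => l.getD j 0 == v) := by
  induction l with
  | nil => rfl
  | cons a t ih =>
    rw [List.count_cons, List.length_cons, List.range_succ_eq_map, List.countP_cons,
      List.countP_map, ih]
    simp only [List.getD_cons_zero, List.getD_cons_succ, Function.comp_def]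

lemma pvFoldl_count {p : Nat → Prop} [DecidablePred p] (l : List Nat) :
    ∀ acc : Int, l.foldl (fun acc j => if p j then acc + 1 else acc) acc =
      acc + ((l.countP fun j => decide (p j)) : Int) := by
  induction l with
  | nil => intro acc; simp
  | cons a l ih =>
    intro acc
    rw [List.foldl_cons, ih, List.countP_cons]
    by_cases h : p a
    · rw [if_pos h, decide_eq_true h, if_pos rfl]
      push_cast
      ring
    · rw [if_neg h, decide_eq_false h]
      simp

lemma pvFoldl_sum (c : Nat → Int) (l : List Nat) :
    ∀ acc : Int, l.foldl (fun acc i => acc + c i) acc = acc + (l.map c).sum := by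
  induction l with
  | nil => intro acc; simp
  | cons a l ih => intro acc; rw [List.foldl_cons, ih, List.map_cons, List.sum_cons]; ring

-- ===== VERDICT (by name: the statement is the Claim_ definition above) =====
theorem solution_v2_spec : Claim_equal_solution_v2 := by
  intro board _ hpre
  unfold Spec_solution_v2 solution_v2 solution_v2_alt
  set n := board.length with hn
  have hsq : pvSq board n := ⟨rfl, hpre⟩
  have hinv0 : pvInv board n [] board := by
    intro i j hi hj
    have hnil : pvHitB board [] i j = false := rfl
    rw [hnil]
    split_ifs with h1 h2
    · exact h1
    · simp at h2
    · rfl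
  have hmain := pvFoldPairs_inv board n (pvPairs n) [] board
    (fun pq hpq => (pvMem_pairs n pq).mp hpq) hsq hinv0
  rw [← pvFold_eq_pairs] at hmain
  set F := (List.range n).foldl
    (fun g i => (List.range n).foldl (fun g j => pvMarkCell n g i j) g) board with hF
  obtain ⟨hFsq, hFinv⟩ := hmain
  -- zero cells of the final board are exactly B's safe cells
  have hzero : ∀ i j, i < n → j < n →
      (pvGet F i j = 0 ↔ (pvGet board i j = 0 ∧ pvHasOneNbr board n i j = false)) := by
    intro i j hi hj
    have hchar := hFinv i j hi hj
    rw [List.nil_append] at hchar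
    rw [hchar]
    by_cases h1 : pvGet board i j = 1
    · simp [h1]
    · have hhit : pvHitB board (pvPairs n) i j = pvHasOneNbr board n i j := by
        by_cases hb : pvHasOneNbr board n i j = true
        · rw [hb, (pvHit_pairs_iff board n i j hi hj).mpr hb]
        · cases hh : pvHitB board (pvPairs n) i j
          · cases hhb : pvHasOneNbr board n i j
            · rfl
            · exact absurd hhb hb
          · exact absurd ((pvHit_pairs_iff board n i j hi hj).mp hh) hb
      rw [if_neg h1, hhit]
      cases hcase : pvHasOneNbr board n i j
      · simp
      · simp
  -- per-row: A's count of zeros = B's inner count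
  have hrowlen : ∀ i, i < n → (F.getD i []).length = n := by
    intro i hi
    have hFlen := hFsq.1
    have hlt : i < F.length := by omega
    rw [List.getD_eq_getElem _ _ hlt]
    exact hFsq.2 _ (List.getElem_mem hlt)
  have hrow : ∀ i, i < n →
      ((F.getD i []).count 0 : Int) =
        ((List.range n).countP
          (fun j => decide (pvGet board i j = 0 ∧ pvHasOneNbr board n i j = false)) : Int) := by
    intro i hi
    rw [pvCount_eq_countP_range, hrowlen i hi]
    congr 1
    apply List.countP_congr
    intro j hj
    have hjn := List.mem_range.mp hj
    have hid : (F.getD i []).getD j 0 = pvGet F i j := rfl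
    rw [hid]
    simp only [beq_iff_eq, decide_eq_true_eq]
    exact hzero i j hi hjn
  -- assemble both sides
  have hB : ∀ acc : Int, (List.range n).foldl (fun acc i =>
      (List.range n).foldl (fun acc j =>
        if pvGet board i j = 0 ∧ pvHasOneNbr board n i j = false then acc + 1 else acc) acc) acc =
      acc + ((List.range n).map (fun i =>
        (((List.range n).countP
          (fun j => decide (pvGet board i j = 0 ∧ pvHasOneNbr board n i j = false))) : Int))).sum := by
    intro acc
    rw [← pvFoldl_sum]
    apply pvFoldl_congr
    intro acc i
    rw [pvFoldl_count]
  rw [hB 0, zero_add]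
  exact congrArg List.sum (List.map_congr_left (fun i hi => hrow i (List.mem_range.mp hi)))
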